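-- pv_equiv track=rewrite | github.com/datagora-erasme/smart_watch | core/GenererRapportHTML.py | _calculate_http_stats
-- ===== SOURCE A (Python) =====
-- def _calculate_http_stats(donnees_urls: list) -> list:
--     """Calcule les statistiques par code HTTP."""
--     code_counts = {}
--     for url in donnees_urls:
--         code_http = url.get("code_http", 0)
--         code_counts[code_http] = code_counts.get(code_http, 0) + 1
--
--     return sorted(
--         [{"code": code, "count": count} for code, count in code_counts.items()],
--         key=lambda x: x["code"],
--     )
-- ===== SOURCE B (Python) =====
-- def _calculate_http_stats(donnees_urls: list) -> list:
--     """Calcule les statistiques par code HTTP."""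
--     codes = sorted(url.get("code_http", 0) for url in donnees_urls)
--     return _group_runs(codes)
--
--
-- def _group_runs(codes: list) -> list:
--     """Groupe une liste triee en runs consecutifs egaux."""
--     if not codes:
--         return []
--     c = codes[0]
--     run = 1
--     while run < len(codes) and codes[run] == c:
--         run += 1
--     return [{"code": c, "count": run}] + _group_runs(codes[run:])
-- ===== Notes on version B (the rewrite author's own statement) =====
-- stated objective: alternative
-- what changed: Replaces A's dict-counting pass followed by sorting the distinct codes with sort-first-then-group: B sorts the extracted codes once and emits one {'code','count'} entry per maximal run of consecutive equal codes, so no counter dict and no final sort over entries is needed.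
import Mathlib
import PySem

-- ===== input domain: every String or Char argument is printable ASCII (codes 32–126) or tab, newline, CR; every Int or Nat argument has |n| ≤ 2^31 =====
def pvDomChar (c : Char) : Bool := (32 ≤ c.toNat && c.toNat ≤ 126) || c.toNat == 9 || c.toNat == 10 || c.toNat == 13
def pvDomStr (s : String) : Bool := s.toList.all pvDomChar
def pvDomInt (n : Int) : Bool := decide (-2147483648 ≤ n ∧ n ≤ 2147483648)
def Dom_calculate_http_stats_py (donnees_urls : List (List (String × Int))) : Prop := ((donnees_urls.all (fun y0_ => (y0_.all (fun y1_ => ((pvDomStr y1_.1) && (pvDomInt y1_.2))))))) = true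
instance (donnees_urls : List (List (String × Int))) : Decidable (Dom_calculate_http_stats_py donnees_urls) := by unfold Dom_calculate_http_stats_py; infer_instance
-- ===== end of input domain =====

-- B replaces A's dict-counting-then-sort by sort-the-codes-first and group consecutive runs (alternative decomposition, same result).


-- ===== PORT A =====
-- literal port of _calculate_http_stats: build a counting dict over code_http, then sort the
-- {"code","count"} entries by their "code" value.  (x["code"] always succeeds on the entries the
-- list comprehension builds, so getD "code" 0 is exact there.)
def calculate_http_stats_py (donnees_urls : List (List (String × Int))) : List (List (String × Int)) :=
  let code_counts : PySem.Dict Int Int :=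
    donnees_urls.foldl (fun d url =>
      let code_http := (PySem.Dict.mk url).getD "code_http" 0
      d.insert code_http (d.getD code_http 0 + 1)) PySem.Dict.empty
  PySem.List.sorted
    (code_counts.items.map (fun p => [("code", p.1), ("count", p.2)]))
    (fun x => (PySem.Dict.mk x).getD "code" 0) false

-- ===== PORT B =====
-- port of _group_runs: the while loop counts the run of codes equal to codes[0]
-- (run = t + 1 with t the length of the equal prefix of the tail); codes[run:] = rest.drop t.
def group_runs : List Int → List (List (String × Int))
  | [] => []
  | c :: rest =>
    let t := (rest.takeWhile (fun x => x == c)).length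
    [("code", c), ("count", ((t : Int) + 1))] :: group_runs (rest.drop t)
termination_by l => l.length
decreasing_by simp [List.length_drop]

-- port of B's _calculate_http_stats: sort the extracted codes, then group consecutive runs
def calculate_http_stats_py_alt (donnees_urls : List (List (String × Int))) : List (List (String × Int)) :=
  let codes := PySem.List.sorted
    (donnees_urls.map (fun url => (PySem.Dict.mk url).getD "code_http" 0)) (fun c => c) false
  group_runs codes

-- ===== PRECONDITION & SPEC =====
def Spec_calculate_http_stats_py (donnees_urls : List (List (String × Int))) (out : List (List (String × Int))) : Prop := out = calculate_http_stats_py_alt donnees_urls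
instance (donnees_urls : List (List (String × Int))) (out : List (List (String × Int))) : Decidable (Spec_calculate_http_stats_py donnees_urls out) := by unfold Spec_calculate_http_stats_py; infer_instance

-- ===== CLAIM (what is proved, stated in full; the proofs are below) =====
def Claim_equal_calculate_http_stats_py : Prop := ∀ (donnees_urls : List (List (String × Int))), Dom_calculate_http_stats_py donnees_urls → Spec_calculate_http_stats_py donnees_urls (calculate_http_stats_py donnees_urls)

-- ===== LEMMAS AND PROOFS =====

-- the head codes of the consecutive runs group_runs walks over
def runHeads : List Int → List Int
  | [] => []
  | c :: rest => c :: runHeads (rest.drop (rest.takeWhile (fun x => x == c)).length)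
termination_by l => l.length
decreasing_by simp [List.length_drop]

lemma drop_len_takeWhile (rest : List Int) (p : Int → Bool) :
    rest.drop (rest.takeWhile p).length = rest.dropWhile p := by
  set t := rest.takeWhile p with ht
  conv_lhs => rw [← List.takeWhile_append_dropWhile (p := p) (l := rest), ← ht]
  rw [List.drop_left]

lemma head_dropWhile_false (p : Int → Bool) (l : List Int) (d : Int) (t : List Int)
    (h : l.dropWhile p = d :: t) : p d = false := by
  induction l with
  | nil => simp at h
  | cons a l ih =>
    rw [List.dropWhile_cons] at h
    split at h
    · exact ih h
    · next hp => cases h; simpa using hp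

-- in a sorted list c :: rest, everything past the run of c's is strictly above c
lemma lt_of_mem_dropWhile (c : Int) (rest : List Int)
    (h : (c :: rest).Pairwise (· ≤ ·)) :
    ∀ x ∈ rest.dropWhile (fun x => x == c), c < x := by
  rcases List.pairwise_cons.mp h with ⟨hc, hr⟩
  have hsub := List.dropWhile_sublist (p := fun x => x == c) (l := rest)
  have hps : (rest.dropWhile (fun x => x == c)).Pairwise (· ≤ ·) := hr.sublist hsub
  cases hd : rest.dropWhile (fun x => x == c) with
  | nil => simp
  | cons d t =>
    have hdne : d ≠ c := by simpa using head_dropWhile_false _ _ _ _ hd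
    have hcd : c < d :=
      lt_of_le_of_ne (hc d (hsub.mem (by rw [hd]; exact List.mem_cons_self))) (Ne.symm hdne)
    intro x hx
    rw [hd] at hps
    rcases List.mem_cons.mp hx with rfl | hx
    · exact hcd
    · exact lt_of_lt_of_le hcd ((List.pairwise_cons.mp hps).1 x hx)

lemma mem_runHeads (x : Int) : ∀ l : List Int, l.Pairwise (· ≤ ·) → (x ∈ runHeads l ↔ x ∈ l) := by
  intro l
  induction l using runHeads.induct with
  | case1 => simp [runHeads]
  | case2 c rest ih =>
    intro hl
    rcases List.pairwise_cons.mp hl with ⟨hc, hr⟩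
    rw [runHeads, drop_len_takeWhile] at *
    have ihd := ih (hr.sublist (List.dropWhile_sublist _))
    constructor
    · intro hx
      rcases List.mem_cons.mp hx with rfl | hx
      · exact List.mem_cons_self
      · exact List.mem_cons_of_mem _ ((List.dropWhile_sublist _).mem (ihd.mp hx))
    · intro hx
      rcases List.mem_cons.mp hx with rfl | hx
      · exact List.mem_cons_self
      · conv at hx => rw [← List.takeWhile_append_dropWhile (p := fun y => y == c) (l := rest)]
        rcases List.mem_append.mp hx with hx | hx
        · have : x = c := by simpa using List.mem_takeWhile_imp hx
          subst this; exact List.mem_cons_self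
        · exact List.mem_cons_of_mem _ (ihd.mpr hx)

lemma runHeads_pairwise : ∀ l : List Int, l.Pairwise (· ≤ ·) → (runHeads l).Pairwise (· < ·) := by
  intro l
  induction l using runHeads.induct with
  | case1 => simp [runHeads]
  | case2 c rest ih =>
    intro hl
    rcases List.pairwise_cons.mp hl with ⟨hc, hr⟩
    rw [runHeads, drop_len_takeWhile] at *
    have hps := hr.sublist (List.dropWhile_sublist (p := fun x => x == c) (l := rest))
    refine List.pairwise_cons.mpr ⟨?_, ih hps⟩
    intro y hy
    exact lt_of_mem_dropWhile c rest hl y ((mem_runHeads y _ hps).mp hy)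

lemma count_sorted_head (c : Int) (rest : List Int)
    (h : (c :: rest).Pairwise (· ≤ ·)) :
    (c :: rest).count c = (rest.takeWhile (fun x => x == c)).length + 1 := by
  rw [List.count_cons_self]
  congr 1
  conv_lhs => rw [← List.takeWhile_append_dropWhile (p := fun x => x == c) (l := rest)]
  rw [List.count_append]
  have h1 : (rest.takeWhile (fun x => x == c)).count c
      = (rest.takeWhile (fun x => x == c)).length := by
    apply List.count_eq_length.mpr
    intro b hb
    have hb' : b = c := by simpa using List.mem_takeWhile_imp hb
    exact hb'.symm
  have h2 : (rest.dropWhile (fun x => x == c)).count c = 0 := by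
    apply List.count_eq_zero.mpr
    intro hmem
    exact absurd (lt_of_mem_dropWhile c rest h c hmem) (lt_irrefl c)
  omega

lemma count_sorted_tail (c : Int) (rest : List Int) (k : Int)
    (h : (c :: rest).Pairwise (· ≤ ·)) (hk : k ∈ rest.dropWhile (fun x => x == c)) :
    (c :: rest).count k = (rest.dropWhile (fun x => x == c)).count k := by
  have hck : c < k := lt_of_mem_dropWhile c rest h k hk
  rw [List.count_cons_of_ne hck.ne]
  conv_lhs => rw [← List.takeWhile_append_dropWhile (p := fun x => x == c) (l := rest)]
  rw [List.count_append, List.count_eq_zero.mpr, zero_add]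
  intro hmem
  have : k = c := by simpa using List.mem_takeWhile_imp hmem
  omega

lemma group_runs_eq : ∀ l : List Int, l.Pairwise (· ≤ ·) →
    group_runs l = (runHeads l).map (fun k => [("code", k), ("count", (l.count k : Int))]) := by
  intro l
  induction l using group_runs.induct with
  | case1 => simp [group_runs, runHeads]
  | case2 c rest t ih =>
    intro hl
    rcases List.pairwise_cons.mp hl with ⟨hc, hr⟩
    have hps := hr.sublist (List.dropWhile_sublist (p := fun x => x == c) (l := rest))
    rw [group_runs, runHeads, List.map_cons]
    rw [drop_len_takeWhile]
    congr 1
    · have := count_sorted_head c rest hl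
      simp [this]
    · rw [drop_len_takeWhile] at ih
      rw [ih hps]
      apply List.map_congr_left
      intro k hk
      have hkm := (mem_runHeads k _ hps).mp hk
      rw [count_sorted_tail c rest k hl hkm]

-- ===== VERDICT (by name: the statement is the Claim_ definition above) =====
theorem calculate_http_stats_py_spec : Claim_equal_calculate_http_stats_py := by
  intro d _
  simp only [Spec_calculate_http_stats_py, calculate_http_stats_py, calculate_http_stats_py_alt]
  have hfold : (List.foldl (fun dd url =>
      dd.insert ((PySem.Dict.mk url).getD "code_http" 0)
        (dd.getD ((PySem.Dict.mk url).getD "code_http" 0) 0 + 1)) PySem.Dict.empty d)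
      = PySem.Dict.counter (d.map (fun url => (PySem.Dict.mk url).getD "code_http" 0)) := by
    rw [← PySem.Dict.foldl_insert_getD_add_one_eq_counter, List.foldl_map]
  rw [hfold, PySem.Dict.items_counter, List.map_map]
  set codes := d.map (fun url => (PySem.Dict.mk url).getD "code_http" 0) with hcodes
  set s := PySem.List.sorted codes (fun c => c) false with hs
  have hsp : s.Pairwise (· ≤ ·) := PySem.List.sorted_pairwise codes (fun c => c)
  have hperm : s.Perm codes := PySem.List.sorted_perm codes (fun c => c) false
  rw [group_runs_eq s hsp]
  have hmapeq : (runHeads s).map (fun k => [("code", k), ("count", (s.count k : Int))])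
      = (runHeads s).map (fun k => [("code", k), ("count", (codes.count k : Int))]) := by
    apply List.map_congr_left
    intro k _
    rw [hperm.count_eq]
  rw [hmapeq]
  apply PySem.List.sorted_eq_of_perm_of_pairwise_lt
  · have hsetperm : (runHeads s).Perm (PySem.Set.ofList codes) := by
      apply (List.perm_ext_iff_of_nodup
        (List.Pairwise.imp ne_of_lt (runHeads_pairwise s hsp))
        (PySem.Set.nodup_ofList codes)).mpr
      intro a
      rw [mem_runHeads a s hsp, hperm.mem_iff, PySem.Set.mem_ofList]
    simpa using hsetperm.map (fun k => [("code", k), ("count", (codes.count k : Int))])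
  · rw [List.pairwise_map]
    apply (runHeads_pairwise s hsp).imp
    intro a b hab
    simpa using hab
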